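-- pv_equiv track=rewrite | github.com/UITxWoodyNguyen/CTF | Dreamhack/14Tiles/solve.py | solve_hand
-- ===== SOURCE A (Python) =====
-- def _solve(counts, melds, pairs):
--     """
--     Recursive mahjong hand validator.
--     Checks if 'counts' can be broken into 'melds' melds + 'pairs' pairs.
--     Melds: triplet (3 same) or sequence (3 consecutive).
--     """
--     if melds == 0 and pairs == 0:
--         return True
--
--     if melds > 0:
--         # Try removing a triplet
--         for i in range(8):
--             if counts[i] >= 3:
--                 counts[i] -= 3
--                 if _solve(counts, melds - 1, pairs):
--                     counts[i] += 3
--                     return True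
--                 counts[i] += 3
--
--         # Try removing a sequence (3 consecutive tile types)
--         for i in range(6):
--             if counts[i] > 0 and counts[i+1] > 0 and counts[i+2] > 0:
--                 counts[i] -= 1; counts[i+1] -= 1; counts[i+2] -= 1
--                 if _solve(counts, melds - 1, pairs):
--                     counts[i] += 1; counts[i+1] += 1; counts[i+2] += 1
--                     return True
--                 counts[i] += 1; counts[i+1] += 1; counts[i+2] += 1
--
--         return False
--
--     # melds == 0, try removing pairs
--     for i in range(8):
--         if counts[i] >= 2:
--             counts[i] -= 2
--             if _solve(counts, 0, pairs - 1):
--                 counts[i] += 2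
--                 return True
--             counts[i] += 2
--
--     return False
--
-- def is_winning(counts):
--     """Check if 14-tile hand is a winner (4 melds + 1 pair)."""
--     return _solve(list(counts), 4, 1)
--
-- def solve_hand(counts):
--     """
--     Given the 13-tile hand (counts[0..7]), find all tiles that complete it.
--     Returns a string of digit chars, or 'None'.
--     """
--     answers = []
--     for tile in range(8):
--         if counts[tile] >= 4:
--             continue  # Already 4 of this tile, can't draw more
--         counts[tile] += 1
--         if is_winning(counts):
--             answers.append(str(tile))
--         counts[tile] -= 1
--     return ''.join(answers) if answers else 'None'
-- ===== SOURCE B (Python) =====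
-- # B: generate-and-test over the fixed multiset of melds instead of recursive
-- # backtracking with mutation: a winning 14-tile hand is exactly a choice of a
-- # sorted quadruple of meld types (8 triplets + 6 sequences) plus one pair tile
-- # whose total tile demand fits under the counts (leftover tiles allowed, as in A).
-- def _dm(m, t):
--     """Demand of meld type m (0..7 triplet at m, 8..13 sequence at m-8) on tile t."""
--     if m < 8:
--         return 3 if t == m else 0
--     return 1 if m - 8 <= t <= m - 6 else 0
--
-- def _wins(c):
--     """Can a pair and 4 melds be removed from c (extra tiles may remain)?"""
--     for m1 in range(14):
--         for m2 in range(m1, 14):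
--             for m3 in range(m2, 14):
--                 for m4 in range(m3, 14):
--                     need = [_dm(m1, t) + _dm(m2, t) + _dm(m3, t) + _dm(m4, t)
--                             for t in range(8)]
--                     if any(0 < need[t] and c[t] < need[t] for t in range(8)):
--                         continue
--                     if any(need[p] + 2 <= c[p] for p in range(8)):
--                         return True
--     return False
--
-- def solve_hand(counts):
--     parts = [str(t) for t in range(8)
--              if counts[t] < 4 and _wins(counts[:t] + [counts[t] + 1] + counts[t + 1:])]
--     return ''.join(parts) if parts else 'None'
-- ===== Notes on version B (the rewrite author's own statement) =====
-- stated objective: alternative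
-- what changed: A's recursive backtracker that mutates/restores the count array is replaced by a non-mutating generate-and-test: enumerate every sorted quadruple of the 14 meld types plus a pair tile and check that their total tile demand fits under the counts.
import Mathlib
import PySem

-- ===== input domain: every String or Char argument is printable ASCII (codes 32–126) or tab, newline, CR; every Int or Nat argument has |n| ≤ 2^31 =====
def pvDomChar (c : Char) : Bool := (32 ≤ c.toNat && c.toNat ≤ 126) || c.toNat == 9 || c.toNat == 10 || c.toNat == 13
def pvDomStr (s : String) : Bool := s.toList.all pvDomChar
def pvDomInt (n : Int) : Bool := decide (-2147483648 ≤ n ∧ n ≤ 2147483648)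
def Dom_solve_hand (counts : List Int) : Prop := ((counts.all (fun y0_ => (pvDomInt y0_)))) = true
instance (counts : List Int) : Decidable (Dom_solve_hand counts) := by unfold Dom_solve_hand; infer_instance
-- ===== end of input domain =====

-- B replaces A's mutating recursive backtracker by a generate-and-test over the
-- fixed multiset of 4 meld types plus a pair (same return value; A mutates its
-- argument transiently but restores it, B never mutates). Objective: alternative.


-- shared trivial accessor: counts[i]; exact for i < counts.length (Pre_ gives 0..7 in range)
def hget (c : List Int) (i : Nat) : Int := c.getD i 0

-- ===== PORT A =====
-- _solve: Python mutates counts[i] and restores it around each recursive call;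
-- ported as recursion on the updated immutable list (net effect identical).
def pvSolve (c : List Int) (melds pairs : Nat) : Bool :=
  if melds = 0 ∧ pairs = 0 then true
  else if 0 < melds then
    ((List.range 8).any fun i =>
      decide (3 ≤ hget c i) &&
        pvSolve (c.set i (hget c i - 3)) (melds - 1) pairs)
    ||
    ((List.range 6).any fun i =>
      (decide (0 < hget c i) && decide (0 < hget c (i+1)) && decide (0 < hget c (i+2))) &&
        pvSolve (((c.set i (hget c i - 1)).set (i+1) (hget c (i+1) - 1)).set (i+2)
                 (hget c (i+2) - 1)) (melds - 1) pairs)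
  else
    (List.range 8).any fun i =>
      decide (2 ≤ hget c i) && pvSolve (c.set i (hget c i - 2)) 0 (pairs - 1)
termination_by melds + pairs
decreasing_by all_goals omega

def pvIsWinning (c : List Int) : Bool := pvSolve c 4 1

def solve_hand (counts : List Int) : String :=
  let answers : List String :=
    (List.range 8).foldl (fun acc tile =>
      if 4 ≤ hget counts tile then acc
      else if pvIsWinning (counts.set tile (hget counts tile + 1)) then
        acc ++ [PySem.Int.toStr (Int.ofNat tile)]
      else acc) []
  if answers.isEmpty then "None" else String.join answers

-- ===== PORT B =====
def dmB (m t : Nat) : Int :=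
  if m < 8 then (if t = m then 3 else 0)
  else (if m - 8 ≤ t ∧ t ≤ m - 6 then 1 else 0)

def needB (m1 m2 m3 m4 t : Nat) : Int := dmB m1 t + dmB m2 t + dmB m3 t + dmB m4 t

def winsB (c : List Int) : Bool :=
  (List.range 14).any fun m1 =>
    (List.range' m1 (14 - m1)).any fun m2 =>
      (List.range' m2 (14 - m2)).any fun m3 =>
        (List.range' m3 (14 - m3)).any fun m4 =>
          ((List.range 8).all fun t =>
            !(decide (0 < needB m1 m2 m3 m4 t) && decide (hget c t < needB m1 m2 m3 m4 t)))
          &&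
          ((List.range 8).any fun p => decide (needB m1 m2 m3 m4 p + 2 ≤ hget c p))

def solve_hand_alt (counts : List Int) : String :=
  let parts : List String :=
    (List.range 8).filterMap fun t =>
      if hget counts t < 4 ∧ winsB (counts.set t (hget counts t + 1)) then
        some (PySem.Int.toStr (Int.ofNat t))
      else none
  if parts.isEmpty then "None" else String.join parts

-- ===== PRECONDITION & SPEC =====
-- Python A reads the first eight entries of counts and raises IndexError on shorter
-- lists, so exactly those inputs are excluded.
def Pre_solve_hand (counts : List Int) : Prop := 8 ≤ counts.length
instance (counts : List Int) : Decidable (Pre_solve_hand counts) := by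
  unfold Pre_solve_hand; infer_instance

def pvWitness_solve_hand : List Int := [2, 2, 2, 2, 2, 2, 1, 0]

def Spec_solve_hand (counts : List Int) (out : String) : Prop := out = solve_hand_alt counts
instance (counts : List Int) (out : String) : Decidable (Spec_solve_hand counts out) := by
  unfold Spec_solve_hand; infer_instance

-- ===== CLAIM (what is proved, stated in full; the proofs are below) =====
def Claim_equal_solve_hand : Prop :=
  ∀ (counts : List Int), Dom_solve_hand counts → Pre_solve_hand counts →
    Spec_solve_hand counts (solve_hand counts)

-- ===== LEMMAS AND PROOFS =====

-- total demand of a list of melds `ms` and a list of pair tiles `ps` on tile t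
def needA (ms ps : List Nat) (t : Nat) : Int :=
  (ps.map (fun p => if t = p then (2:Int) else 0)).sum + (ms.map (fun m => dmB m t)).sum

lemma dmB_nonneg (m t : Nat) : 0 ≤ dmB m t := by
  unfold dmB; split_ifs <;> norm_num

lemma needA_nonneg (ms ps : List Nat) (t : Nat) : 0 ≤ needA ms ps t := by
  unfold needA
  have h1 : 0 ≤ (ps.map (fun p => if t = p then (2:Int) else 0)).sum := by
    apply List.sum_nonneg; intro x hx
    simp only [List.mem_map] at hx
    obtain ⟨p, _, rfl⟩ := hx; split_ifs <;> norm_num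
  have h2 : 0 ≤ (ms.map (fun m => dmB m t)).sum := by
    apply List.sum_nonneg; intro x hx
    simp only [List.mem_map] at hx
    obtain ⟨m, _, rfl⟩ := hx; exact dmB_nonneg m t
  omega

lemma hget_set {c : List Int} {i : Nat} (h : i < c.length) (x : Int) (t : Nat) :
    hget (c.set i x) t = if t = i then x else hget c t := by
  unfold hget
  simp only [List.getD, List.getElem?_set]
  rcases eq_or_ne t i with rfl | hne
  · simp [h]
  · simp [hne, Ne.symm hne]

-- the invariant condition: the demand fits under c wherever it is positive
def Fits (ms ps : List Nat) (c : List Int) : Prop :=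
  ∀ t, t < 8 → 0 < needA ms ps t → needA ms ps t ≤ hget c t


lemma needA_cons (m : Nat) (ms ps : List Nat) (t : Nat) :
    needA (m :: ms) ps t = dmB m t + needA ms ps t := by
  simp [needA]; ring

lemma needA_pair_cons (p : Nat) (ms ps : List Nat) (t : Nat) :
    needA ms (p :: ps) t = (if t = p then 2 else 0) + needA ms ps t := by
  simp [needA]; ring

lemma dmB_trip {i : Nat} (hi : i < 8) (t : Nat) : dmB i t = if t = i then 3 else 0 := by
  simp [dmB, hi]

lemma dmB_seq {i : Nat} (hi : i < 6) (t : Nat) :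
    dmB (i + 8) t = if i ≤ t ∧ t ≤ i + 2 then 1 else 0 := by
  simp only [dmB]
  rw [if_neg (by omega)]
  have h8 : i + 8 - 8 = i := by omega
  have h6 : i + 8 - 6 = i + 2 := by omega
  rw [h8, h6]

lemma fits_cons_trip {i : Nat} (hi : i < 8) (ms ps : List Nat) (c : List Int)
    (hc : 8 ≤ c.length) :
    Fits (i :: ms) ps c ↔ 3 ≤ hget c i ∧ Fits ms ps (c.set i (hget c i - 3)) := by
  have hi' : i < c.length := by omega
  have hnn := needA_nonneg ms ps
  constructor
  · intro h
    have h3 : 3 ≤ hget c i := by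
      have := h i (by omega) (by rw [needA_cons, dmB_trip hi]; simp; have := hnn i; omega)
      rw [needA_cons, dmB_trip hi] at this; simp at this; have := hnn i; omega
    refine ⟨h3, ?_⟩
    intro t ht hp
    rw [hget_set hi']
    by_cases hti : t = i
    · subst hti
      have := h t ht (by rw [needA_cons, dmB_trip hi]; simp; omega)
      rw [needA_cons, dmB_trip hi] at this; simp at this
      rw [if_pos rfl]; omega
    · have := h t ht (by rw [needA_cons, dmB_trip hi]; simp [hti]; omega)
      rw [needA_cons, dmB_trip hi] at this; simp [hti] at this
      rw [if_neg hti]; omega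
  · rintro ⟨h3, h⟩
    intro t ht hp
    rw [needA_cons, dmB_trip hi] at hp ⊢
    by_cases hti : t = i
    · subst hti
      rw [if_pos rfl] at hp ⊢
      by_cases hz : 0 < needA ms ps t
      · have := h t ht hz; rw [hget_set hi', if_pos rfl] at this; omega
      · have := hnn t; omega
    · simp only [if_neg hti] at *
      have := h t ht (by omega)
      rw [hget_set hi', if_neg hti] at this; omega

lemma hget_set3 {c : List Int} {i : Nat} (hi : i < 6) (hc : 8 ≤ c.length)
    (x y z : Int) (t : Nat) :
    hget (((c.set i x).set (i+1) y).set (i+2) z) t =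
      if t = i + 2 then z else if t = i + 1 then y else if t = i then x else hget c t := by
  rw [hget_set (by simp; omega), hget_set (by simp; omega), hget_set (by omega)]

lemma fits_cons_seq {i : Nat} (hi : i < 6) (ms ps : List Nat) (c : List Int)
    (hc : 8 ≤ c.length) :
    Fits ((i + 8) :: ms) ps c ↔
      (0 < hget c i ∧ 0 < hget c (i+1) ∧ 0 < hget c (i+2) ∧
       Fits ms ps (((c.set i (hget c i - 1)).set (i+1) (hget c (i+1) - 1)).set (i+2)
                   (hget c (i+2) - 1))) := by
  have hnn := needA_nonneg ms ps
  constructor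
  · intro h
    have key : ∀ u, i ≤ u → u ≤ i + 2 → 0 < hget c u := by
      intro u h1 h2
      have := h u (by omega) (by rw [needA_cons, dmB_seq hi]; simp [h1, h2]; have := hnn u; omega)
      rw [needA_cons, dmB_seq hi] at this; simp [h1, h2] at this
      have := hnn u; omega
    refine ⟨key i (by omega) (by omega), key (i+1) (by omega) (by omega),
            key (i+2) (by omega) (by omega), ?_⟩
    intro t ht hp
    rw [hget_set3 hi hc]
    by_cases hin : i ≤ t ∧ t ≤ i + 2
    · have h' := h t ht (by rw [needA_cons, dmB_seq hi]; simp [hin]; omega)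
      rw [needA_cons, dmB_seq hi, if_pos hin] at h'
      by_cases ht2 : t = i + 2
      · subst ht2; rw [if_pos rfl]; omega
      · by_cases ht1 : t = i + 1
        · subst ht1; rw [if_neg (by omega), if_pos rfl]; omega
        · have ht0 : t = i := by omega
          subst ht0; rw [if_neg (by omega), if_neg (by omega), if_pos rfl]; omega
    · have h' := h t ht (by rw [needA_cons, dmB_seq hi]; simp [hin]; omega)
      rw [needA_cons, dmB_seq hi, if_neg hin] at h'
      rw [if_neg (by omega), if_neg (by omega), if_neg (by omega)]; omega
  · rintro ⟨g0, g1, g2, h⟩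
    intro t ht hp
    rw [needA_cons, dmB_seq hi] at hp ⊢
    by_cases hin : i ≤ t ∧ t ≤ i + 2
    · rw [if_pos hin] at *
      by_cases hz : 0 < needA ms ps t
      · have h' := h t ht hz; rw [hget_set3 hi hc] at h'
        rcases (by omega : t = i ∨ t = i + 1 ∨ t = i + 2) with rfl | rfl | rfl
        · rw [if_neg (by omega), if_neg (by omega), if_pos rfl] at h'; omega
        · rw [if_neg (by omega), if_pos rfl] at h'; omega
        · rw [if_pos rfl] at h'; omega
      · have := hnn t
        rcases (by omega : t = i ∨ t = i + 1 ∨ t = i + 2) with rfl | rfl | rfl <;> omega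
    · rw [if_neg hin] at *
      have h' := h t ht (by omega)
      rw [hget_set3 hi hc, if_neg (by omega), if_neg (by omega), if_neg (by omega)] at h'
      omega

lemma fits_cons_pair {p : Nat} (hp : p < 8) (ms ps : List Nat) (c : List Int)
    (hc : 8 ≤ c.length) :
    Fits ms (p :: ps) c ↔ 2 ≤ hget c p ∧ Fits ms ps (c.set p (hget c p - 2)) := by
  have hp' : p < c.length := by omega
  have hnn := needA_nonneg ms ps
  constructor
  · intro h
    have h2 : 2 ≤ hget c p := by
      have := h p (by omega) (by rw [needA_pair_cons]; simp; have := hnn p; omega)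
      rw [needA_pair_cons] at this; simp at this; have := hnn p; omega
    refine ⟨h2, ?_⟩
    intro t ht hq
    rw [hget_set hp']
    by_cases htp : t = p
    · subst htp
      have := h t ht (by rw [needA_pair_cons]; simp; omega)
      rw [needA_pair_cons] at this; simp at this
      rw [if_pos rfl]; omega
    · have := h t ht (by rw [needA_pair_cons]; simp [htp]; omega)
      rw [needA_pair_cons] at this; simp [htp] at this
      rw [if_neg htp]; omega
  · rintro ⟨h2, h⟩
    intro t ht hq
    rw [needA_pair_cons] at hq ⊢
    by_cases htp : t = p
    · subst htp
      rw [if_pos rfl] at hq ⊢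
      by_cases hz : 0 < needA ms ps t
      · have := h t ht hz; rw [hget_set hp', if_pos rfl] at this; omega
      · have := hnn t; omega
    · simp only [if_neg htp] at *
      have := h t ht (by omega)
      rw [hget_set hp', if_neg htp] at this; omega

-- characterization of A's recursive search
lemma pvSolve_iff (n : Nat) :
    ∀ (melds pairs : Nat) (c : List Int), melds + pairs ≤ n → 8 ≤ c.length →
    (pvSolve c melds pairs = true ↔
      ∃ ms ps : List Nat, ms.length = melds ∧ ps.length = pairs ∧
        (∀ m ∈ ms, m < 14) ∧ (∀ p ∈ ps, p < 8) ∧ Fits ms ps c) := by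
  induction n with
  | zero =>
    intro melds pairs c hle hc
    have hm : melds = 0 := by omega
    have hp : pairs = 0 := by omega
    subst hm hp
    rw [pvSolve, if_pos ⟨rfl, rfl⟩]
    constructor
    · intro _
      exact ⟨[], [], rfl, rfl, by simp, by simp, by intro t ht h0; simp [needA] at h0⟩
    · intro _; rfl
  | succ n ih =>
    intro melds pairs c hle hc
    by_cases h0 : melds = 0 ∧ pairs = 0
    · obtain ⟨rfl, rfl⟩ := h0
      rw [pvSolve, if_pos ⟨rfl, rfl⟩]
      constructor
      · intro _
        exact ⟨[], [], rfl, rfl, by simp, by simp, by intro t ht h0; simp [needA] at h0⟩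
      · intro _; rfl
    · rw [pvSolve, if_neg h0]
      by_cases hm : 0 < melds
      · rw [if_pos hm, Bool.or_eq_true]
        simp only [List.any_eq_true, List.mem_range, Bool.and_eq_true, decide_eq_true_eq]
        constructor
        · rintro (⟨i, hi, h3, hrec⟩ | ⟨i, hi, ⟨⟨g0, g1⟩, g2⟩, hrec⟩)
          · obtain ⟨ms, ps, hl1, hl2, hb1, hb2, hfit⟩ :=
              (ih (melds - 1) pairs _ (by omega) (by simp [hc])).mp hrec
            refine ⟨i :: ms, ps, by simp [hl1]; omega, hl2, ?_, hb2,
              (fits_cons_trip hi ms ps c hc).mpr ⟨h3, hfit⟩⟩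
            intro m hm'
            rcases List.mem_cons.mp hm' with rfl | hm'
            · omega
            · exact hb1 m hm'
          · obtain ⟨ms, ps, hl1, hl2, hb1, hb2, hfit⟩ :=
              (ih (melds - 1) pairs _ (by omega) (by simp [hc])).mp hrec
            refine ⟨(i + 8) :: ms, ps, by simp [hl1]; omega, hl2, ?_, hb2,
              (fits_cons_seq hi ms ps c hc).mpr ⟨g0, g1, g2, hfit⟩⟩
            intro m hm'
            rcases List.mem_cons.mp hm' with rfl | hm'
            · omega
            · exact hb1 m hm'
        · rintro ⟨ms, ps, hl1, hl2, hb1, hb2, hfit⟩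
          cases ms with
          | nil => simp at hl1; omega
          | cons m ms' =>
            have hm14 : m < 14 := hb1 m List.mem_cons_self
            have hl1' : ms'.length = melds - 1 := by simp at hl1; omega
            have hb1' : ∀ x ∈ ms', x < 14 := fun x hx => hb1 x (List.mem_cons_of_mem _ hx)
            by_cases hm8 : m < 8
            · left
              have hft := (fits_cons_trip hm8 ms' ps c hc).mp hfit
              exact ⟨m, hm8, hft.1,
                (ih (melds - 1) pairs _ (by omega) (by simp [hc])).mpr
                  ⟨ms', ps, hl1', hl2, hb1', hb2, hft.2⟩⟩
            · right
              have hi6 : m - 8 < 6 := by omega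
              have hmi : m = (m - 8) + 8 := by omega
              rw [hmi] at hfit
              have hft := (fits_cons_seq hi6 ms' ps c hc).mp hfit
              exact ⟨m - 8, hi6, ⟨⟨hft.1, hft.2.1⟩, hft.2.2.1⟩,
                (ih (melds - 1) pairs _ (by omega) (by simp [hc])).mpr
                  ⟨ms', ps, hl1', hl2, hb1', hb2, hft.2.2.2⟩⟩
      · have hm0 : melds = 0 := by omega
        rw [if_neg hm]
        simp only [List.any_eq_true, List.mem_range, Bool.and_eq_true, decide_eq_true_eq]
        constructor
        · rintro ⟨p, hp8, h2, hrec⟩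
          obtain ⟨ms, ps, hl1, hl2, hb1, hb2, hfit⟩ :=
            (ih 0 (pairs - 1) _ (by omega) (by simp [hc])).mp hrec
          cases ms with
          | cons _ _ => simp at hl1
          | nil =>
            exact ⟨[], p :: ps, by simp [hm0], by simp [hl2]; omega,
              by simp, by intro x hx; rcases List.mem_cons.mp hx with rfl | hx;
                          · omega
                          · exact hb2 x hx,
              (fits_cons_pair hp8 [] ps c hc).mpr ⟨h2, hfit⟩⟩
        · rintro ⟨ms, ps, hl1, hl2, hb1, hb2, hfit⟩
          cases ms with
          | cons _ _ => rw [hm0] at hl1; simp at hl1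
          | nil =>
            cases ps with
            | nil => simp at hl2; omega
            | cons p ps' =>
              have hp8 : p < 8 := hb2 p List.mem_cons_self
              have hft := (fits_cons_pair hp8 [] ps' c hc).mp hfit
              exact ⟨p, hp8, hft.1,
                (ih 0 (pairs - 1) _ (by omega) (by simp [hc])).mpr
                  ⟨[], ps', rfl, by simp at hl2; omega, by simp,
                   fun x hx => hb2 x (List.mem_cons_of_mem _ hx), hft.2⟩⟩

lemma needB_nonneg (m1 m2 m3 m4 t : Nat) : 0 ≤ needB m1 m2 m3 m4 t := by
  have h1 := dmB_nonneg m1 t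
  have h2 := dmB_nonneg m2 t
  have h3 := dmB_nonneg m3 t
  have h4 := dmB_nonneg m4 t
  unfold needB; omega

-- B's per-candidate check, phrased through the shared demand function
lemma fits_quad_iff (m1 m2 m3 m4 p : Nat) (hp : p < 8) (c : List Int) :
    Fits [m1, m2, m3, m4] [p] c ↔
      ((∀ t, t < 8 → 0 < needB m1 m2 m3 m4 t → needB m1 m2 m3 m4 t ≤ hget c t) ∧
       needB m1 m2 m3 m4 p + 2 ≤ hget c p) := by
  have he : ∀ t, needA [m1, m2, m3, m4] [p] t
      = (if t = p then 2 else 0) + needB m1 m2 m3 m4 t := by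
    intro t; simp [needA, needB]; ring
  have hnn := needB_nonneg m1 m2 m3 m4
  unfold Fits
  constructor
  · intro h
    refine ⟨?_, ?_⟩
    · intro t ht hpos
      by_cases htp : t = p
      · subst htp
        have := h t ht (by rw [he]; simp; omega)
        rw [he] at this; simp at this; omega
      · have := h t ht (by rw [he]; simp [htp]; omega)
        rw [he] at this; simp [htp] at this; omega
    · have := h p hp (by rw [he]; simp; have := hnn p; omega)
      rw [he] at this; simp at this; omega
  · rintro ⟨h1, h2⟩ t ht hpos
    rw [he] at hpos ⊢
    by_cases htp : t = p
    · subst htp; rw [if_pos rfl] at hpos ⊢; omega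
    · simp only [if_neg htp] at *
      have := h1 t ht (by omega); omega

-- B's search characterization
lemma winsB_iff (c : List Int) :
    winsB c = true ↔
      ∃ m1 m2 m3 m4 p : Nat, m1 ≤ m2 ∧ m2 ≤ m3 ∧ m3 ≤ m4 ∧ m4 < 14 ∧ p < 8 ∧
        Fits [m1, m2, m3, m4] [p] c := by
  unfold winsB
  simp only [List.any_eq_true, List.all_eq_true, List.mem_range, List.mem_range'_1,
    Bool.and_eq_true, Bool.not_eq_true', Bool.and_eq_false_iff,
    decide_eq_true_eq, decide_eq_false_iff_not, not_lt]
  constructor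
  · rintro ⟨m1, h1, m2, h2, m3, h3, m4, h4, hall, p, hp, hpair⟩
    refine ⟨m1, m2, m3, m4, p, by omega, by omega, by omega, by omega, hp, ?_⟩
    rw [fits_quad_iff _ _ _ _ _ hp]
    refine ⟨?_, hpair⟩
    intro t ht hpos
    rcases hall t ht with hf | hf
    · omega
    · omega
  · rintro ⟨m1, m2, m3, m4, p, h12, h23, h34, h14, hp, hfit⟩
    rw [fits_quad_iff _ _ _ _ _ hp] at hfit
    refine ⟨m1, by omega, m2, ⟨h12, by omega⟩, m3, ⟨h23, by omega⟩, m4, ⟨h34, by omega⟩,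
      ?_, p, hp, hfit.2⟩
    intro t ht
    by_cases h : 0 < needB m1 m2 m3 m4 t
    · exact Or.inr (by have := hfit.1 t ht h; omega)
    · exact Or.inl (by omega)

lemma needA_perm {ms ms' : List Nat} (h : ms.Perm ms') (ps : List Nat) (t : Nat) :
    needA ms ps t = needA ms' ps t := by
  unfold needA
  rw [(h.map (fun m => dmB m t)).sum_eq]

-- any 4-element meld list has a sorted rearrangement with the same demand
lemma fits_sorted (a b c d : Nat) (ps : List Nat) (cs : List Int)
    (h : Fits [a, b, c, d] ps cs) :
    ∃ m1 m2 m3 m4, m1 ≤ m2 ∧ m2 ≤ m3 ∧ m3 ≤ m4 ∧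
      [m1, m2, m3, m4].Perm [a, b, c, d] ∧ Fits [m1, m2, m3, m4] ps cs := by
  have hperm := List.mergeSort_perm [a, b, c, d] (fun x y : Nat => decide (x ≤ y))
  have hsort := List.pairwise_mergeSort (le := fun x y : Nat => decide (x ≤ y))
    (by intro x y z hxy hyz; simp at hxy hyz ⊢; omega)
    (by intro x y; simp; omega) [a, b, c, d]
  obtain ⟨m1, m2, m3, m4, hl⟩ : ∃ x y z w,
      ([a, b, c, d].mergeSort (fun x y : Nat => decide (x ≤ y))) = [x, y, z, w] := by
    have hlen : ([a, b, c, d].mergeSort (fun x y : Nat => decide (x ≤ y))).length = 4 := by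
      rw [(List.mergeSort_perm [a, b, c, d] _).length_eq]; rfl
    rcases hml : [a, b, c, d].mergeSort (fun x y : Nat => decide (x ≤ y)) with
      _ | ⟨x, _ | ⟨y, _ | ⟨z, _ | ⟨w, _ | ⟨v, tl⟩⟩⟩⟩⟩ <;> rw [hml] at hlen <;> simp at hlen
    exact ⟨x, y, z, w, rfl⟩
  rw [hl] at hperm hsort
  simp only [List.pairwise_cons, List.mem_cons] at hsort
  refine ⟨m1, m2, m3, m4, ?_, ?_, ?_, hperm, ?_⟩
  · have := hsort.1 m2 (by simp); simpa using this
  · have := hsort.2.1 m3 (by simp); simpa using this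
  · have := hsort.2.2.1 m4 (by simp); simpa using this
  · intro t ht hpos
    rw [needA_perm hperm] at hpos ⊢
    exact h t ht hpos

lemma pvSolve_eq_winsB (c : List Int) (hc : 8 ≤ c.length) :
    pvSolve c 4 1 = winsB c := by
  have hiff : pvSolve c 4 1 = true ↔ winsB c = true := by
    rw [pvSolve_iff 5 4 1 c (by omega) hc, winsB_iff c]
    constructor
    · rintro ⟨ms, ps, hl1, hl2, hb1, hb2, hfit⟩
      obtain ⟨a, b, cc, d, rfl⟩ : ∃ x y z w, ms = [x, y, z, w] := by
        rcases ms with _ | ⟨x, _ | ⟨y, _ | ⟨z, _ | ⟨w, _ | ⟨v, tl⟩⟩⟩⟩⟩ <;> simp at hl1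
        exact ⟨x, y, z, w, rfl⟩
      obtain ⟨p, rfl⟩ : ∃ p, ps = [p] := by
        rcases ps with _ | ⟨p, _ | ⟨q, tl⟩⟩ <;> simp at hl2
        exact ⟨p, rfl⟩
      obtain ⟨m1, m2, m3, m4, h12, h23, h34, hperm, hfit'⟩ := fits_sorted a b cc d [p] c hfit
      have hm4 : m4 < 14 := hb1 m4 (hperm.mem_iff.mp (by simp))
      exact ⟨m1, m2, m3, m4, p, h12, h23, h34, hm4, hb2 p (by simp), hfit'⟩
    · rintro ⟨m1, m2, m3, m4, p, h12, h23, h34, h14, hp, hfit⟩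
      exact ⟨[m1, m2, m3, m4], [p], rfl, rfl,
        by intro m hm'; simp at hm'; omega,
        by intro q hq; simp at hq; omega, hfit⟩
  cases ha : pvSolve c 4 1 <;> cases hb : winsB c <;> simp_all

-- the two per-tile loops build the same list of digit strings
lemma loop_eq (counts : List Int) (hpre : 8 ≤ counts.length) (l : List Nat)
    (hl : ∀ t ∈ l, t < 8) (acc : List String) :
    l.foldl (fun acc tile =>
      if 4 ≤ hget counts tile then acc
      else if pvIsWinning (counts.set tile (hget counts tile + 1)) then
        acc ++ [PySem.Int.toStr (Int.ofNat tile)]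
      else acc) acc
    = acc ++ l.filterMap (fun t =>
        if hget counts t < 4 ∧ winsB (counts.set t (hget counts t + 1)) then
          some (PySem.Int.toStr (Int.ofNat t))
        else none) := by
  induction l generalizing acc with
  | nil => simp
  | cons hd tl ihl =>
    have hd8 : hd < 8 := hl hd List.mem_cons_self
    have hw : pvIsWinning (counts.set hd (hget counts hd + 1))
        = winsB (counts.set hd (hget counts hd + 1)) := by
      unfold pvIsWinning
      exact pvSolve_eq_winsB _ (by simp; omega)
    simp only [List.foldl_cons]
    by_cases h4 : 4 ≤ hget counts hd
    · rw [if_pos h4, List.filterMap_cons_none (by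
        rw [if_neg (by omega : ¬ (hget counts hd < 4 ∧
          winsB (counts.set hd (hget counts hd + 1)) = true))])]
      exact ihl (fun t ht => hl t (List.mem_cons_of_mem _ ht)) acc
    · rw [if_neg h4]
      by_cases hwin : winsB (counts.set hd (hget counts hd + 1)) = true
      · rw [if_pos (by rw [hw]; exact hwin),
          List.filterMap_cons_some (by rw [if_pos ⟨by omega, hwin⟩]),
          ihl (fun t ht => hl t (List.mem_cons_of_mem _ ht))]
        simp
      · rw [if_neg (by rw [hw]; simpa using hwin), List.filterMap_cons_none (by
          rw [if_neg (by simp [hwin])])]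
        exact ihl (fun t ht => hl t (List.mem_cons_of_mem _ ht)) acc

-- ===== VERDICT (by name: the statement is the Claim_ definition above) =====
theorem solve_hand_spec : Claim_equal_solve_hand := by
  intro counts _ hpre
  unfold Spec_solve_hand solve_hand solve_hand_alt
  rw [loop_eq counts hpre (List.range 8) (by intro t ht; simpa using ht) []]
  rfl
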